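-- pv_equiv track=rewrite | github.com/DreamSpoon/AMH2B | amh2b/anim_viseme/func_word_viseme.py | non_alphanumpostrophe_to_space
-- ===== SOURCE A (Python) =====
-- ALPHABET = "ABCDEFGHIJKLMNOPQRSTUVWXYZ"
--
-- def non_alphanumpostrophe_to_space(in_str):
--     result = ""
--     prev_apostrophe = 0
--     for ch in in_str:
--         if ch.upper() in ALPHABET:
--             if prev_apostrophe == 1:
--                 result += "'"
--             prev_apostrophe = 0
--             result += ch.upper()
--         elif ch == "'":
--             if prev_apostrophe == 1:
--                 result += "  "
--             elif prev_apostrophe > 1: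
--                 result += " "
--             prev_apostrophe += 1
--         else:
--             result += " "
--             prev_apostrophe = 0
--     return result
-- ===== SOURCE B (Python) =====
-- ALPHABET = "ABCDEFGHIJKLMNOPQRSTUVWXYZ"
--
-- def non_alphanumpostrophe_to_space(in_str):
--     pieces = []
--     i, n = 0, len(in_str)
--     while i < n:
--         ch = in_str[i]
--         if ch == "'":
--             j = i + 1
--             while j < n and in_str[j] == "'":
--                 j += 1
--             k = j - i
--             if k >= 2:
--                 pieces.append(" " * k)
--             elif j < n and in_str[j].upper() in ALPHABET:
--                 pieces.append("'")
--             i = j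
--         else:
--             up = ch.upper()
--             pieces.append(up if up in ALPHABET else " ")
--             i += 1
--     return "".join(pieces)
-- ===== Notes on version B (the rewrite author's own statement) =====
-- stated objective: alternative
-- what changed: Replaces A's stateful single-pass transducer with a deferred-apostrophe counter by a run-length scan: each maximal apostrophe run of length k>=2 becomes k spaces, a lone apostrophe is kept only if the next character is a letter (lookahead), other characters map independently.
import Mathlib
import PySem

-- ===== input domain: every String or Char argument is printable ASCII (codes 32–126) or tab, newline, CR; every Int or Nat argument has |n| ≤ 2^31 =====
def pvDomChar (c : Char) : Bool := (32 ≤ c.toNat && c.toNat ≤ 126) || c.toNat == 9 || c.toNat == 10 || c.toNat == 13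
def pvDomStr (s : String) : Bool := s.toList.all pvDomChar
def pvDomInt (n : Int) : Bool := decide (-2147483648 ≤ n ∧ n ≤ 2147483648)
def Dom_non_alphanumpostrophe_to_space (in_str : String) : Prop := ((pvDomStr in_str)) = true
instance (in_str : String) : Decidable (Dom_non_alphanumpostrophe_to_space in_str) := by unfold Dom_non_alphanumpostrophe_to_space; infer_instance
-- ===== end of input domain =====

-- B replaces A's stateful deferred-apostrophe counter by a run-length scan with one-character
-- lookahead; objective: alternative decomposition, same O(n) cost.

-- ===== PORT A =====
-- ALPHABET = "ABCDEFGHIJKLMNOPQRSTUVWXYZ"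
def pvALPHABET : List Char := "ABCDEFGHIJKLMNOPQRSTUVWXYZ".toList

-- one step of A's for-loop; state = (result, prev_apostrophe).
-- ch.upper() in ALPHABET is ported as membership of upperChar ch in the letter list
-- (exact for single characters; the admitted domain is ASCII).
def aStep (st : List Char × Int) (ch : Char) : List Char × Int :=
  let result := st.1
  let prev := st.2
  if PySem.Chars.upperChar ch ∈ pvALPHABET then
    ((if prev == 1 then result ++ ['\''] else result) ++ [PySem.Chars.upperChar ch], 0)
  else if ch = '\'' then
    ((if prev == 1 then result ++ [' ', ' ']
      else if prev > 1 then result ++ [' '] else result), prev + 1)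
  else
    (result ++ [' '], 0)

def non_alphanumpostrophe_to_space (in_str : String) : String :=
  String.mk (in_str.toList.foldl aStep ([], 0)).1

-- ===== PORT B =====
-- output for a single non-apostrophe character
def bOut (c : Char) : Char :=
  if PySem.Chars.upperChar c ∈ pvALPHABET then PySem.Chars.upperChar c else ' '

-- the outer while-loop of Source B: run-length scan over apostrophe runs with lookahead
def bGo : List Char → List Char
  | [] => []
  | c :: cs =>
    if c = '\'' then
      let run := cs.takeWhile (· = '\'')
      let rest := cs.dropWhile (· = '\'')
      let k := 1 + run.length
      if 2 ≤ k then List.replicate k ' ' ++ bGo rest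
      else
        match rest with
        | [] => bGo rest
        | r :: _ => if PySem.Chars.upperChar r ∈ pvALPHABET then '\'' :: bGo rest else bGo rest
    else bOut c :: bGo cs
  termination_by l => l.length
  decreasing_by all_goals simp only [List.length_cons]; first
    | exact Nat.lt_succ_of_le (List.length_dropWhile_le _ cs)
    | exact Nat.lt_succ_of_le (Nat.le_refl _)

def non_alphanumpostrophe_to_space_alt (in_str : String) : String :=
  String.mk (bGo in_str.toList)

-- ===== PRECONDITION & SPEC =====
def Spec_non_alphanumpostrophe_to_space (in_str : String) (out : String) : Prop := out = non_alphanumpostrophe_to_space_alt in_str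
instance (in_str : String) (out : String) : Decidable (Spec_non_alphanumpostrophe_to_space in_str out) := by unfold Spec_non_alphanumpostrophe_to_space; infer_instance

-- ===== CLAIM (what is proved, stated in full; the proofs are below) =====
def Claim_equal_non_alphanumpostrophe_to_space : Prop := ∀ (in_str : String), Dom_non_alphanumpostrophe_to_space in_str → Spec_non_alphanumpostrophe_to_space in_str (non_alphanumpostrophe_to_space in_str)

-- ===== LEMMAS AND PROOFS =====

-- proof-side view of A's loop: the output it will still emit from state prev on input l
def funA (prev : Int) : List Char → List Char
  | [] => []
  | c :: cs =>
    if PySem.Chars.upperChar c ∈ pvALPHABET then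
      (if prev == 1 then ['\''] else []) ++ (PySem.Chars.upperChar c :: funA 0 cs)
    else if c = '\'' then
      (if prev == 1 then [' ', ' '] else if prev > 1 then [' '] else []) ++ funA (prev + 1) cs
    else ' ' :: funA 0 cs

theorem foldl_aStep (l : List Char) : ∀ (res : List Char) (p : Int),
    (l.foldl aStep (res, p)).1 = res ++ funA p l := by
  induction l with
  | nil => intro res p; simp [funA]
  | cons c cs ih =>
    intro res p
    simp only [List.foldl_cons, aStep, funA]
    split_ifs <;> simp [ih]

-- once prev ≥ 2, the exact value of prev no longer matters
theorem funA_run (l : List Char) : ∀ (p q : Int), 2 ≤ p → 2 ≤ q → funA p l = funA q l := by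
  induction l with
  | nil => intros; rfl
  | cons c cs ih =>
    intro p q hp hq
    have hp1 : (p == 1) = false := by simp; omega
    have hq1 : (q == 1) = false := by simp; omega
    have hp2 : p > 1 := by omega
    have hq2 : q > 1 := by omega
    simp only [funA, hp1, hq1, Bool.false_eq_true, if_false, if_pos hp2, if_pos hq2]
    split_ifs with h1 h2
    · rfl
    · rw [ih (p + 1) (q + 1) (by omega) (by omega)]
    · rfl

-- from state 2, an apostrophe run of length n emits n spaces
theorem funA_spaces (run : List Char) : ∀ (rest : List Char), (∀ c ∈ run, c = '\'') →
    funA 2 (run ++ rest) = List.replicate run.length ' ' ++ funA 2 rest := by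
  induction run with
  | nil => intros; simp
  | cons c run' ih =>
    intro rest hall
    have hc : c = '\'' := hall c (by simp)
    subst hc
    have hnl : PySem.Chars.upperChar '\'' ∉ pvALPHABET := by decide
    simp only [List.cons_append, funA, if_neg hnl]
    rw [funA_run (run' ++ rest) (2 + 1) 2 (by omega) (by omega),
        ih rest (fun c hc => hall c (by simp [hc]))]
    simp [List.replicate_succ]

-- once the head is not an apostrophe (or the list ends), states 2 and 0 agree
theorem funA_two_zero : ∀ (rest : List Char),
    (rest = [] ∨ ∃ r rs, rest = r :: rs ∧ r ≠ '\'') → funA 2 rest = funA 0 rest := by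
  intro rest h
  rcases h with h | ⟨r, rs, rfl, hr⟩
  · subst h; rfl
  · by_cases hL : PySem.Chars.upperChar r ∈ pvALPHABET
    · simp [funA, hL]
    · simp [funA, hL, hr]

-- from state 1 (one pending lone apostrophe), the apostrophe survives iff the next char is a letter
theorem funA_one : ∀ (r : Char) (rs : List Char), r ≠ '\'' →
    funA 1 (r :: rs) =
      (if PySem.Chars.upperChar r ∈ pvALPHABET then ['\''] else []) ++ funA 0 (r :: rs) := by
  intro r rs hr
  by_cases hL : PySem.Chars.upperChar r ∈ pvALPHABET
  · simp [funA, hL]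
  · simp [funA, hL, hr]

theorem dropWhile_head_false (p : Char → Bool) : ∀ (cs : List Char) (r : Char) (rs : List Char),
    cs.dropWhile p = r :: rs → p r = false := by
  intro cs
  induction cs with
  | nil => intro r rs h; simp [List.dropWhile] at h
  | cons c cs ih =>
    intro r rs h
    rw [List.dropWhile_cons] at h
    split at h
    · exact ih r rs h
    · cases h; simp_all

-- unfolding lemma for bGo on an apostrophe head
theorem bGo_ap (cs : List Char) : bGo ('\'' :: cs) =
    if 2 ≤ 1 + (cs.takeWhile (· = '\'')).length then
      List.replicate (1 + (cs.takeWhile (· = '\'')).length) ' ' ++ bGo (cs.dropWhile (· = '\''))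
    else
      match cs.dropWhile (· = '\'') with
      | [] => bGo (cs.dropWhile (· = '\''))
      | r :: _ =>
        if PySem.Chars.upperChar r ∈ pvALPHABET then '\'' :: bGo (cs.dropWhile (· = '\''))
        else bGo (cs.dropWhile (· = '\'')) := by
  rw [bGo]
  simp

theorem takeWhile_nil_of_small (cs : List Char)
    (hk : ¬ 2 ≤ 1 + (cs.takeWhile (· = '\'')).length) : cs.takeWhile (· = '\'') = [] := by
  cases h : cs.takeWhile (· = '\'') with
  | nil => rfl
  | cons a b => rw [h] at hk; simp at hk

theorem funA_eq_bGo (l : List Char) : funA 0 l = bGo l := by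
  have hap : PySem.Chars.upperChar '\'' ∉ pvALPHABET := by decide
  induction l using bGo.induct with
  | case1 => simp [funA, bGo]
  | case2 cs run rest k hk0 ih =>
    have hk : 2 ≤ 1 + (cs.takeWhile (· = '\'')).length := hk0
    clear hk0
    -- head '\'', run length ≥ 2: run = takeWhile cs is nonempty
    obtain ⟨r0, run', hrun⟩ : ∃ r0 run', cs.takeWhile (· = '\'') = r0 :: run' := by
      cases h : cs.takeWhile (· = '\'') with
      | nil => rw [h] at hk; simp at hk
      | cons a b => exact ⟨a, b, rfl⟩
    have hr0 : r0 = '\'' := by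
      have h := List.mem_takeWhile_imp (show r0 ∈ cs.takeWhile (· = '\'') by rw [hrun]; simp)
      simpa using h
    have hrun' : ∀ c ∈ run', c = '\'' := by
      intro c hc
      have h := List.mem_takeWhile_imp (show c ∈ cs.takeWhile (· = '\'') by rw [hrun]; simp [hc])
      simpa using h
    have hsplit : cs = ('\'' :: run') ++ cs.dropWhile (· = '\'') := by
      conv_lhs => rw [← List.takeWhile_append_dropWhile (p := (· = '\'')) (l := cs)]
      rw [hrun, hr0]
    have hrest : cs.dropWhile (· = '\'') = [] ∨
        ∃ r rs, cs.dropWhile (· = '\'') = r :: rs ∧ r ≠ '\'' := by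
      cases h : cs.dropWhile (· = '\'') with
      | nil => exact Or.inl rfl
      | cons a b =>
        refine Or.inr ⟨a, b, rfl, ?_⟩
        have := dropWhile_head_false _ cs a b h
        simpa using this
    calc funA 0 ('\'' :: cs)
        = funA 1 cs := by simp [funA, hap]
      _ = [' ', ' '] ++ funA 2 (run' ++ cs.dropWhile (· = '\'')) := by
          conv_lhs => rw [hsplit]
          simp [funA, hap]
      _ = [' ', ' '] ++ (List.replicate run'.length ' ' ++ funA 2 (cs.dropWhile (· = '\''))) := by
          rw [funA_spaces run' _ hrun']
      _ = List.replicate (1 + (cs.takeWhile (· = '\'')).length) ' ' ++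
            funA 0 (cs.dropWhile (· = '\'')) := by
          rw [funA_two_zero _ hrest, hrun]
          have h2 : 1 + (r0 :: run').length = run'.length + 2 := by simp; omega
          rw [h2]
          simp [List.replicate_succ]
      _ = bGo ('\'' :: cs) := by
          have ih' : funA 0 (cs.dropWhile (· = '\'')) = bGo (cs.dropWhile (· = '\'')) := ih
          rw [bGo_ap, if_pos hk, ih']
  | case3 cs run rest k hk0 hnil0 ih =>
    have hk : ¬ 2 ≤ 1 + (cs.takeWhile (· = '\'')).length := hk0
    have hnil : cs.dropWhile (· = '\'') = [] := hnil0
    clear hk0 hnil0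
    have hrun := takeWhile_nil_of_small cs hk
    have hcs : cs = [] := by
      have := List.takeWhile_append_dropWhile (p := (· = '\'')) (l := cs)
      rw [hrun, hnil] at this; simpa using this.symm
    subst hcs
    simp [funA, bGo, hap]
  | case4 cs run rest k hk0 r rs hrest0 hL ih =>
    have hk : ¬ 2 ≤ 1 + (cs.takeWhile (· = '\'')).length := hk0
    have hrest : cs.dropWhile (· = '\'') = r :: rs := hrest0
    clear hk0 hrest0
    have hrun := takeWhile_nil_of_small cs hk
    have hcs : cs = r :: rs := by
      have := List.takeWhile_append_dropWhile (p := (· = '\'')) (l := cs)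
      rw [hrun, hrest] at this; simpa using this.symm
    have hr : r ≠ '\'' := by
      have := dropWhile_head_false _ cs r rs hrest; simpa using this
    calc funA 0 ('\'' :: cs)
        = funA 1 cs := by simp [funA, hap]
      _ = ['\''] ++ funA 0 (r :: rs) := by rw [hcs, funA_one r rs hr, if_pos hL]
      _ = bGo ('\'' :: cs) := by
          have ih' : funA 0 (r :: rs) = bGo (r :: rs) := by rw [← hrest]; exact ih
          rw [bGo_ap, if_neg hk, hrest]
          simp [hL, ih']
  | case5 cs run rest k hk0 r rs hrest0 hL ih =>
    have hk : ¬ 2 ≤ 1 + (cs.takeWhile (· = '\'')).length := hk0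
    have hrest : cs.dropWhile (· = '\'') = r :: rs := hrest0
    clear hk0 hrest0
    have hrun := takeWhile_nil_of_small cs hk
    have hcs : cs = r :: rs := by
      have := List.takeWhile_append_dropWhile (p := (· = '\'')) (l := cs)
      rw [hrun, hrest] at this; simpa using this.symm
    have hr : r ≠ '\'' := by
      have := dropWhile_head_false _ cs r rs hrest; simpa using this
    calc funA 0 ('\'' :: cs)
        = funA 1 cs := by simp [funA, hap]
      _ = funA 0 (r :: rs) := by rw [hcs, funA_one r rs hr, if_neg hL]; simp
      _ = bGo ('\'' :: cs) := by
          have ih' : funA 0 (r :: rs) = bGo (r :: rs) := by rw [← hrest]; exact ih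
          rw [bGo_ap, if_neg hk, hrest]
          simp [hL, ih']
  | case6 r cs hr ih =>
    by_cases hL : PySem.Chars.upperChar r ∈ pvALPHABET
    · simp [funA, bGo, bOut, hL, hr, ih]
    · simp [funA, bGo, bOut, hL, hr, ih]

-- ===== VERDICT (by name: the statement is the Claim_ definition above) =====
theorem non_alphanumpostrophe_to_space_spec : Claim_equal_non_alphanumpostrophe_to_space := by
  intro s _
  unfold Spec_non_alphanumpostrophe_to_space non_alphanumpostrophe_to_space non_alphanumpostrophe_to_space_alt
  rw [foldl_aStep, funA_eq_bGo]
  rfl
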